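-- pv_equiv track=rewrite | github.com/dalmoz/CAPLex | scan/scan.py | integers
-- ===== SOURCE A (Python) =====
-- def integers ( chlng ):
--     units = [
--         "zero", "one", "two", "three", "four", "five", "six", "seven", "eight",
--         "nine", "ten", "eleven", "twelve", "thirteen", "fourteen", "fifteen",
--         "sixteen", "seventeen", "eighteen", "nineteen" ]
--
--     tens = [
--         "twenty", "thirty", "forty", "fifty", "sixty", "seventy",
--         "eighty", "ninety" ]
--     magnitude = ["hundred", "thousand", "million", "billion", "trillion"]
--
--     cUnits = [s[:1].upper() + s[1:] for s in units]
--     cTens = [s[:1].upper() + s[1:] for s in tens]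
--     cMagnitude = [s[:1].upper() + s[1:] for s in magnitude]
--
--     integers = [ "0","1","2","3","4","5","6","7","8","9"]
--
--
--     #python magic right here
--
--     keywords = units + tens + cUnits + cTens + magnitude + cMagnitude + integers
--
--     spot = False
--
--     for i in keywords:
--         if i in chlng:
--             spot = True
--             break
--
--     return spot
-- ===== SOURCE B (Python) =====
-- # Single left-to-right position scan: at each index, report a digit or a
-- # number-word starting there, instead of one substring search per keyword.
-- _WORDS = (
--     "zero", "one", "two", "three", "four", "five", "six", "seven", "eight",
--     "nine", "ten", "eleven", "twelve", "thirteen", "fourteen", "fifteen",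
--     "sixteen", "seventeen", "eighteen", "nineteen",
--     "twenty", "thirty", "forty", "fifty", "sixty", "seventy",
--     "eighty", "ninety",
--     "Zero", "One", "Two", "Three", "Four", "Five", "Six", "Seven", "Eight",
--     "Nine", "Ten", "Eleven", "Twelve", "Thirteen", "Fourteen", "Fifteen",
--     "Sixteen", "Seventeen", "Eighteen", "Nineteen",
--     "Twenty", "Thirty", "Forty", "Fifty", "Sixty", "Seventy",
--     "Eighty", "Ninety",
--     "hundred", "thousand", "million", "billion", "trillion",
--     "Hundred", "Thousand", "Million", "Billion", "Trillion",
-- )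
-- _DIGITS = "0123456789"
--
-- def integers(chlng):
--     for i in range(len(chlng)):
--         if chlng[i] in _DIGITS:
--             return True
--         if any(chlng.startswith(w, i) for w in _WORDS):
--             return True
--     return False
-- ===== Notes on version B (the rewrite author's own statement) =====
-- stated objective: alternative
-- what changed: B replaces A's per-keyword substring scans (one 'in' search per keyword) with a single left-to-right scan over positions that checks for a digit or a number-word starting at each position.
import Mathlib
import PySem

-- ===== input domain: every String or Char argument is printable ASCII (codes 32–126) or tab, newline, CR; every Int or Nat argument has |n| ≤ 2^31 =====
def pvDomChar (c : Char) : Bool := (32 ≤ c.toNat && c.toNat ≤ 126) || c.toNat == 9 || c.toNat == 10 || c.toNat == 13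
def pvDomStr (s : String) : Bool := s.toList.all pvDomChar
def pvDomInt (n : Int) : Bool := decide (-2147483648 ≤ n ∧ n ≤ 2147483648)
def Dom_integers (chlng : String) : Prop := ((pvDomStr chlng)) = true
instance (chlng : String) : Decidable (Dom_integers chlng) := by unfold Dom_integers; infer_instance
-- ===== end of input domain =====

-- B replaces A's per-keyword substring searches by one scan over positions of
-- the input, testing for a digit or a number-word starting at each position
-- (objective: alternative formulation, same result).

-- ===== PORT A =====
-- s[:1].upper() + s[1:]  (slices with nonnegative bounds: take/drop are exact here)
def pvCap (s : String) : String :=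
  String.ofList (PySem.Chars.upper (s.toList.take 1) ++ s.toList.drop 1)

-- the for-loop with `spot`/break: returns at the first keyword found
def pvLoopA : List String → String → Bool
  | [], _ => false
  | k :: rest, c => if PySem.Str.isIn k c then true else pvLoopA rest c

def integers (chlng : String) : Bool :=
  let units : List String := [
    "zero", "one", "two", "three", "four", "five", "six", "seven", "eight",
    "nine", "ten", "eleven", "twelve", "thirteen", "fourteen", "fifteen",
    "sixteen", "seventeen", "eighteen", "nineteen" ]
  let tens : List String := [
    "twenty", "thirty", "forty", "fifty", "sixty", "seventy",
    "eighty", "ninety" ]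
  let magnitude : List String := ["hundred", "thousand", "million", "billion", "trillion"]
  let cUnits := units.map pvCap
  let cTens := tens.map pvCap
  let cMagnitude := magnitude.map pvCap
  let ints : List String := ["0","1","2","3","4","5","6","7","8","9"]
  let keywords := units ++ tens ++ cUnits ++ cTens ++ magnitude ++ cMagnitude ++ ints
  pvLoopA keywords chlng

-- ===== PORT B =====
-- Source B's module constant _WORDS
def pvWords : List String := [
  "zero", "one", "two", "three", "four", "five", "six", "seven", "eight",
  "nine", "ten", "eleven", "twelve", "thirteen", "fourteen", "fifteen",
  "sixteen", "seventeen", "eighteen", "nineteen",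
  "twenty", "thirty", "forty", "fifty", "sixty", "seventy",
  "eighty", "ninety",
  "Zero", "One", "Two", "Three", "Four", "Five", "Six", "Seven", "Eight",
  "Nine", "Ten", "Eleven", "Twelve", "Thirteen", "Fourteen", "Fifteen",
  "Sixteen", "Seventeen", "Eighteen", "Nineteen",
  "Twenty", "Thirty", "Forty", "Fifty", "Sixty", "Seventy",
  "Eighty", "Ninety",
  "hundred", "thousand", "million", "billion", "trillion",
  "Hundred", "Thousand", "Million", "Billion", "Trillion" ]

-- Source B's module constant _DIGITS (a string; `ch in _DIGITS` on a 1-char ch is membership)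
def pvDigits : List Char := "0123456789".toList

-- the index loop `for i in range(len(chlng))`, ported as structural recursion on
-- the suffix chlng[i:] (chlng.startswith(w, i) = w is a prefix of that suffix)
def pvScan : List Char → Bool
  | [] => false
  | c :: rest =>
    if pvDigits.contains c then true
    else if pvWords.any (fun w => PySem.Chars.startswith (c :: rest) w.toList) then true
    else pvScan rest

def integers_alt (chlng : String) : Bool := pvScan chlng.toList

-- ===== PRECONDITION & SPEC =====
def Spec_integers (chlng : String) (out : Bool) : Prop := out = integers_alt chlng
instance (chlng : String) (out : Bool) : Decidable (Spec_integers chlng out) := by unfold Spec_integers; infer_instance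

-- ===== CLAIM (what is proved, stated in full; the proofs are below) =====
def Claim_equal_integers : Prop := ∀ (chlng : String), Dom_integers chlng → Spec_integers chlng (integers chlng)

-- ===== LEMMAS AND PROOFS =====

-- A's keyword list, fully evaluated, is B's word list followed by the digit strings
def pvDigitStrs : List String := ["0","1","2","3","4","5","6","7","8","9"]

theorem pvLoopA_eq_any (l : List String) (c : String) :
    pvLoopA l c = l.any (fun k => PySem.Str.isIn k c) := by
  induction l with
  | nil => rfl
  | cons k rest ih =>
      cases h : PySem.Chars.isIn k.toList c.toList <;>
        simp [pvLoopA, PySem.Str.isIn, h, ih]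

theorem integers_eq_loop (chlng : String) :
    integers chlng = pvLoopA (pvWords ++ pvDigitStrs) chlng := by
  rfl

theorem integers_iff (chlng : String) :
    integers chlng = true ↔
      ∃ kw ∈ pvWords ++ pvDigitStrs, kw.toList <:+: chlng.toList := by
  rw [integers_eq_loop, pvLoopA_eq_any, List.any_eq_true]
  simp only [PySem.Str.isIn_iff_infix]

-- one step of B's scan, as a Bool on the current suffix
def pvStepB : List Char → Bool
  | [] => false
  | c :: rest =>
    pvDigits.contains c || pvWords.any (fun w => PySem.Chars.startswith (c :: rest) w.toList)

theorem pvScan_eq_any_tails (cs : List Char) :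
    pvScan cs = cs.tails.any pvStepB := by
  induction cs with
  | nil => rfl
  | cons c rest ih =>
      cases hd : pvDigits.contains c <;>
        cases hw : pvWords.any (fun w => PySem.Chars.startswith (c :: rest) w.toList) <;>
          simp [pvScan, pvStepB, hw, ih]

theorem integers_alt_iff (chlng : String) :
    integers_alt chlng = true ↔
      ∃ t, t <:+ chlng.toList ∧ pvStepB t = true := by
  rw [integers_alt, pvScan_eq_any_tails, List.any_eq_true]
  constructor
  · rintro ⟨t, ht, hs⟩; exact ⟨t, (List.mem_tails _ _).1 ht, hs⟩
  · rintro ⟨t, ht, hs⟩; exact ⟨t, (List.mem_tails _ _).2 ht, hs⟩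

-- every digit char is the toList of some digit keyword
theorem pvDigits_eq : pvDigits = ['0','1','2','3','4','5','6','7','8','9'] := by decide

theorem pvDigit_kw : ∀ c ∈ pvDigits, ∃ kw ∈ pvDigitStrs, kw.toList = [c] := by
  intro c hc
  rw [pvDigits_eq] at hc
  fin_cases hc <;> decide

-- every digit keyword is a single digit char
theorem pvDigitStr_char : ∀ kw ∈ pvDigitStrs, ∃ c ∈ pvDigits, kw.toList = [c] := by
  intro kw hkw
  fin_cases hkw
  · exact ⟨'0', by rw [pvDigits_eq]; simp, by decide⟩
  · exact ⟨'1', by rw [pvDigits_eq]; simp, by decide⟩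
  · exact ⟨'2', by rw [pvDigits_eq]; simp, by decide⟩
  · exact ⟨'3', by rw [pvDigits_eq]; simp, by decide⟩
  · exact ⟨'4', by rw [pvDigits_eq]; simp, by decide⟩
  · exact ⟨'5', by rw [pvDigits_eq]; simp, by decide⟩
  · exact ⟨'6', by rw [pvDigits_eq]; simp, by decide⟩
  · exact ⟨'7', by rw [pvDigits_eq]; simp, by decide⟩
  · exact ⟨'8', by rw [pvDigits_eq]; simp, by decide⟩
  · exact ⟨'9', by rw [pvDigits_eq]; simp, by decide⟩

-- no word keyword is empty
theorem pvWords_ne_nil : ∀ w ∈ pvWords, w.toList ≠ [] := by decide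

theorem pvStepB_iff (t : List Char) :
    pvStepB t = true ↔
      (∃ c r, t = c :: r ∧ c ∈ pvDigits) ∨ ∃ w ∈ pvWords, w.toList <+: t := by
  cases t with
  | nil =>
      simp only [pvStepB]
      constructor
      · intro h; cases h
      · rintro (⟨c, r, h, _⟩ | ⟨w, hw, hp⟩)
        · cases h
        · exact absurd (List.prefix_nil.1 hp) (pvWords_ne_nil w hw)
  | cons c rest =>
      simp only [pvStepB, Bool.or_eq_true, List.any_eq_true,
        PySem.Chars.startswith_iff, List.contains_iff_mem]
      constructor
      · rintro (hc | ⟨w, hw, hp⟩)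
        · exact Or.inl ⟨c, rest, rfl, hc⟩
        · exact Or.inr ⟨w, hw, hp⟩
      · rintro (⟨c', r, he, hc⟩ | ⟨w, hw, hp⟩)
        · cases he; exact Or.inl hc
        · exact Or.inr ⟨w, hw, hp⟩

theorem main_iff (cs : List Char) :
    (∃ kw ∈ pvWords ++ pvDigitStrs, kw.toList <:+: cs) ↔
      ∃ t, t <:+ cs ∧ pvStepB t = true := by
  constructor
  · rintro ⟨kw, hkw, hinf⟩
    rcases List.infix_iff_prefix_suffix.1 hinf with ⟨t, hpre, hsuf⟩
    rcases List.mem_append.1 hkw with hw | hd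
    · exact ⟨t, hsuf, (pvStepB_iff t).2 (Or.inr ⟨kw, hw, hpre⟩)⟩
    · rcases pvDigitStr_char kw hd with ⟨c, hc, he⟩
      rw [he] at hpre
      rcases hpre with ⟨u, hu⟩
      exact ⟨t, hsuf, (pvStepB_iff t).2 (Or.inl ⟨c, u, hu.symm, hc⟩)⟩
  · rintro ⟨t, hsuf, hstep⟩
    rcases (pvStepB_iff t).1 hstep with ⟨c, r, rfl, hc⟩ | ⟨w, hw, hpre⟩
    · rcases pvDigit_kw c hc with ⟨kw, hkw, he⟩
      refine ⟨kw, List.mem_append.2 (Or.inr hkw), ?_⟩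
      rw [he]
      exact List.infix_iff_prefix_suffix.2 ⟨c :: r, ⟨r, rfl⟩, hsuf⟩
    · exact ⟨w, List.mem_append.2 (Or.inl hw),
        List.infix_iff_prefix_suffix.2 ⟨t, hpre, hsuf⟩⟩

-- ===== VERDICT (by name: the statement is the Claim_ definition above) =====
theorem integers_spec : Claim_equal_integers := by
  intro chlng _
  unfold Spec_integers
  rw [Bool.eq_iff_iff, integers_iff, integers_alt_iff, main_iff]
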